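-- pv_equiv track=rewrite | github.com/alicesilva/P1-Python-Problemas | 123.py | tem123plus
-- ===== SOURCE A (Python) =====
-- def tem123plus(l):
-- 	indice = -1
-- 	for i in range(len(l)):
-- 		if l[i] == 1:
-- 			for j in range(i,len(l)):
-- 				if l[j] == 2:
-- 					for k in range(j,len(l)):
-- 						if l[k] == 3:
-- 							for m in range(len(l)):
-- 								if l[m] == 1:
-- 									indice = m
-- 									break
--
-- 	return indice
-- ===== SOURCE B (Python) =====
-- def tem123plus(l):
--     idx = -1
--     state = 0
--     for pos, v in enumerate(l):
--         if state == 0: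
--             if v == 1:
--                 idx = pos
--                 state = 1
--         elif state == 1:
--             if v == 2:
--                 state = 2
--         else:
--             if v == 3:
--                 return idx
--     return -1
-- ===== Notes on version B (the rewrite author's own statement) =====
-- stated objective: alternative
-- what changed: Replaced the four nested index loops (which rediscover the first 1 on every full match) by a single left-to-right state machine that records the first 1's index, then waits for a 2, then for a 3; B is single-pass on every input, A is single-pass only when no match exists.
import Mathlib
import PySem

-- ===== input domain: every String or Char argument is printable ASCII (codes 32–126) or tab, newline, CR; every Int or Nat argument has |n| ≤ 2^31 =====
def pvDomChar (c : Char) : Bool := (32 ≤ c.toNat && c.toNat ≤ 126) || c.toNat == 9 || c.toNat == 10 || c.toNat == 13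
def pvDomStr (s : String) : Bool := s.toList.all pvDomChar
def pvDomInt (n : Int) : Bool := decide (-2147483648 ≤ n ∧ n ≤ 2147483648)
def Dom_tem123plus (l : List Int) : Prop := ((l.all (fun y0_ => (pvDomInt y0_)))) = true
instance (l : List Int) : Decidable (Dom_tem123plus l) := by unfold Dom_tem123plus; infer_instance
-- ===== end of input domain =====

-- B replaces A's four nested index loops by a single-pass state machine (record the first 1's
-- index, then wait for a 2, then a 3); a structurally different, single-pass algorithm.


-- ===== PORT A =====
-- Python A's loops index only in-range positions and use l[i] solely to compare with a
-- constant, so each 'for x in range(start, len(l))' is rendered as structural recursion over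
-- the corresponding suffix of l (the current element v is l[index]); this is exact.

-- inner 'for m in range(len(l)): if l[m] == 1: indice = m; break'
def firstOneA (s : List Int) (pos : Nat) (ind : Int) : Int :=
  match s with
  | [] => ind
  | v :: r => if v = 1 then (pos : Int) else firstOneA r (pos + 1) ind

-- 'for k in range(j, len(l))'
def kloopA (l : List Int) (s : List Int) (ind : Int) : Int :=
  match s with
  | [] => ind
  | v :: r => kloopA l r (if v = 3 then firstOneA l 0 ind else ind)

-- 'for j in range(i, len(l))'; the k-loop starts at j, i.e. on the same suffix v :: r
def jloopA (l : List Int) (s : List Int) (ind : Int) : Int :=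
  match s with
  | [] => ind
  | v :: r => jloopA l r (if v = 2 then kloopA l (v :: r) ind else ind)

-- 'for i in range(len(l))'; the j-loop starts at i
def iloopA (l : List Int) (s : List Int) (ind : Int) : Int :=
  match s with
  | [] => ind
  | v :: r => iloopA l r (if v = 1 then jloopA l (v :: r) ind else ind)

def tem123plus (l : List Int) : Int := iloopA l l (-1)

-- ===== PORT B =====
-- single pass; state 0 = looking for 1 (recording its index), 1 = looking for 2, 2 = looking for 3
def altGo (s : List Int) (pos : Nat) (state : Nat) (idx : Int) : Int :=
  match s with
  | [] => -1
  | v :: r =>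
    if state = 0 then
      if v = 1 then altGo r (pos + 1) 1 (pos : Int) else altGo r (pos + 1) 0 idx
    else if state = 1 then
      if v = 2 then altGo r (pos + 1) 2 idx else altGo r (pos + 1) 1 idx
    else
      if v = 3 then idx else altGo r (pos + 1) 2 idx

def tem123plus_alt (l : List Int) : Int := altGo l 0 0 (-1)

-- ===== PRECONDITION & SPEC =====
def Spec_tem123plus (l : List Int) (out : Int) : Prop := out = tem123plus_alt l
instance (l : List Int) (out : Int) : Decidable (Spec_tem123plus l out) := by unfold Spec_tem123plus; infer_instance

-- ===== CLAIM (what is proved, stated in full; the proofs are below) =====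
def Claim_equal_tem123plus : Prop := ∀ (l : List Int), Dom_tem123plus l → Spec_tem123plus l (tem123plus l)

-- ===== LEMMAS AND PROOFS =====

-- "some 2 in s has a 3 at the same or a later position"
def has23 : List Int → Bool
  | [] => false
  | v :: r => (decide (v = 2) && decide ((3 : Int) ∈ v :: r)) || has23 r

-- "some 1 in s has a 2 and then a 3 at weakly later positions"
def has123 : List Int → Bool
  | [] => false
  | v :: r => (decide (v = 1) && has23 (v :: r)) || has123 r

theorem has23_mem3 (s : List Int) (h : has23 s = true) : (3 : Int) ∈ s := by
  induction s with
  | nil => simp [has23] at h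
  | cons v r ih =>
    simp only [has23, Bool.or_eq_true, Bool.and_eq_true, decide_eq_true_eq] at h
    rcases h with ⟨_, h3⟩ | h
    · exact h3
    · exact List.mem_cons_of_mem _ (ih h)

theorem has123_has23 (s : List Int) (h : has123 s = true) : has23 s = true := by
  induction s with
  | nil => simp [has123] at h
  | cons v r ih =>
    simp only [has123, Bool.or_eq_true, Bool.and_eq_true] at h
    rcases h with ⟨_, h2⟩ | h
    · exact h2
    · simp [has23, ih h]

theorem firstOneA_eq (s : List Int) (pos : Nat) (ind : Int) :
    firstOneA s pos ind = if (1 : Int) ∈ s then ((pos + s.findIdx (· = 1) : Nat) : Int) else ind := by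
  induction s generalizing pos with
  | nil => simp [firstOneA]
  | cons v r ih =>
    by_cases hv : v = 1
    · simp [firstOneA, hv, List.findIdx_cons]
    · have h1v : ¬ (1 : Int) = v := fun h => hv h.symm
      simp only [firstOneA, if_neg hv, ih (pos + 1), List.findIdx_cons, List.mem_cons]
      by_cases hm : (1 : Int) ∈ r <;> simp [hm, h1v, hv] <;> omega

theorem kloopA_eq (l s : List Int) (ind : Int) (h1 : (1 : Int) ∈ l) :
    kloopA l s ind = if (3 : Int) ∈ s then ((l.findIdx (· = 1) : Nat) : Int) else ind := by
  induction s generalizing ind with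
  | nil => simp [kloopA]
  | cons v r ih =>
    simp only [kloopA, ih, firstOneA_eq, h1, if_true, List.mem_cons]
    by_cases hv : v = 3
    · by_cases hr : (3 : Int) ∈ r <;> simp [hv, hr]
    · have h3v : ¬ (3 : Int) = v := fun h => hv h.symm
      by_cases hr : (3 : Int) ∈ r <;> simp [hv, hr, h3v]

theorem jloopA_eq (l s : List Int) (ind : Int) (h1 : (1 : Int) ∈ l) :
    jloopA l s ind = if has23 s then ((l.findIdx (· = 1) : Nat) : Int) else ind := by
  induction s generalizing ind with
  | nil => simp [jloopA, has23]
  | cons v r ih =>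
    simp only [jloopA, ih, kloopA_eq l _ _ h1]
    by_cases hv : v = 2
    · by_cases hr : has23 r = true <;> by_cases h3 : (3 : Int) ∈ (v :: r) <;>
        simp [has23, hv, hr, h3]
    · by_cases hr : has23 r = true <;> simp [has23, hv, hr]

theorem iloopA_eq (l s : List Int) (ind : Int) (hsub : ∀ x ∈ s, x ∈ l) :
    iloopA l s ind = if has123 s then ((l.findIdx (· = 1) : Nat) : Int) else ind := by
  induction s generalizing ind with
  | nil => simp [iloopA, has123]
  | cons v r ih =>
    have hsubr : ∀ x ∈ r, x ∈ l := fun x hx => hsub x (List.mem_cons_of_mem _ hx)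
    simp only [iloopA, ih _ hsubr]
    by_cases hv : v = 1
    · have h1l : (1 : Int) ∈ l := hv ▸ hsub v List.mem_cons_self
      rw [jloopA_eq l _ _ h1l]
      by_cases hr : has123 r = true
      · have h23 : has23 (v :: r) = true := by
          simp [has23, has123_has23 r hr]
        simp [has123, hv, hr, h23]
      · by_cases h23 : has23 (v :: r) = true <;> simp [has123, hv, hr, h23]
    · by_cases hr : has123 r = true <;> simp [has123, hv, hr]

theorem altGo_state2 (s : List Int) (pos : Nat) (idx : Int) :
    altGo s pos 2 idx = if (3 : Int) ∈ s then idx else -1 := by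
  induction s generalizing pos with
  | nil => simp [altGo]
  | cons v r ih =>
    by_cases hv : v = 3
    · simp [altGo, hv]
    · have h3v : ¬ (3 : Int) = v := fun h => hv h.symm
      simp [altGo, hv, h3v, ih (pos + 1), List.mem_cons]

theorem altGo_state1 (s : List Int) (pos : Nat) (idx : Int) :
    altGo s pos 1 idx = if has23 s then idx else -1 := by
  induction s generalizing pos with
  | nil => simp [altGo, has23]
  | cons v r ih =>
    by_cases hv : v = 2
    · have hstep : altGo (v :: r) pos 1 idx = altGo r (pos + 1) 2 idx := by
        simp [altGo, hv]
      rw [hstep, altGo_state2]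
      by_cases hr3 : (3 : Int) ∈ r
      · have hc : has23 (v :: r) = true := by simp [has23, hv, List.mem_cons, hr3]
        simp [hr3, hc]
      · have hf : has23 r = false := by
          cases hc : has23 r
          · rfl
          · exact absurd (has23_mem3 r hc) hr3
        have hc : has23 (v :: r) = false := by
          simp [has23, hv, List.mem_cons, hr3, hf]
        simp [hr3, hc]
    · have hstep : altGo (v :: r) pos 1 idx = altGo r (pos + 1) 1 idx := by
        simp [altGo, hv]
      rw [hstep, ih (pos + 1)]
      have hc : has23 (v :: r) = has23 r := by simp [has23, hv]
      rw [hc]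

theorem altGo_state0 (s : List Int) (pos : Nat) (idx : Int) :
    altGo s pos 0 idx = if has123 s then ((pos + s.findIdx (· = 1) : Nat) : Int) else -1 := by
  induction s generalizing pos idx with
  | nil => simp [altGo, has123]
  | cons v r ih =>
    by_cases hv : v = 1
    · subst hv
      have hstep : altGo ((1 : Int) :: r) pos 0 idx = altGo r (pos + 1) 1 (pos : Int) := by
        simp [altGo]
      rw [hstep, altGo_state1]
      have hcond : has123 ((1 : Int) :: r) = has23 r := by
        have h23 : has23 ((1 : Int) :: r) = has23 r := by simp [has23]
        cases hr : has123 r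
        · simp [has123, h23, hr]
        · simp [has123, h23, hr, has123_has23 r hr]
      rw [hcond]
      by_cases hr : has23 r = true <;> simp [hr, List.findIdx_cons]
    · have hstep : altGo (v :: r) pos 0 idx = altGo r (pos + 1) 0 idx := by
        simp [altGo, hv]
      rw [hstep, ih (pos + 1)]
      have hcond : has123 (v :: r) = has123 r := by simp [has123, hv]
      rw [hcond, List.findIdx_cons]
      by_cases hr : has123 r = true <;> simp [hr, hv] <;> omega

-- ===== VERDICT (by name: the statement is the Claim_ definition above) =====
theorem tem123plus_spec : Claim_equal_tem123plus := by
  intro l _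
  show tem123plus l = tem123plus_alt l
  rw [tem123plus, tem123plus_alt, iloopA_eq l l _ (fun x hx => hx), altGo_state0]
  simp
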